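-- pv_equiv track=rewrite | github.com/T0chka/Abbreviator | abb_app/utils.py | _capitalize_by_abbreviation
-- ===== SOURCE A (Python) =====
-- def _capitalize_by_abbreviation(
--         text: str, abbr_letters: str
--     ) -> str:
--     """Capitalize words in text based on abbreviation letters."""
--     abbr_index = 0  # Position in the abbreviation
--     text_pos = 0  # Position in the text
--     text_chars = list(text)
--
--     while abbr_index < len(abbr_letters) and text_pos < len(text_chars):
--         current_char = text_chars[text_pos]
--         if (current_char.lower() == abbr_letters[abbr_index].lower()
--             and (text_pos == 0 or not text_chars[text_pos - 1].isalpha())):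
--             text_chars[text_pos] = current_char.upper()
--             abbr_index += 1
--         text_pos += 1
--
--     return ''.join(text_chars)
-- ===== SOURCE B (Python) =====
-- def _capitalize_by_abbreviation(text, abbr_letters):
--     """Capitalize words in text based on abbreviation letters."""
--     out = []
--     pos = 0
--     prev_alpha = False
--     for letter in abbr_letters:
--         target = letter.lower()
--         for c in text[pos:]:
--             pos += 1
--             if not prev_alpha and c.lower() == target:
--                 out.append(c.upper())
--                 prev_alpha = c.isalpha()
--                 break
--             out.append(c)
--             prev_alpha = c.isalpha()
--         else:
--             break  # text exhausted without a match: nothing left to do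
--     out.append(text[pos:])
--     return ''.join(out)
-- ===== Notes on version B (the rewrite author's own statement) =====
-- stated objective: faster
-- what changed: B loops over the abbreviation letters (outer loop), and for each letter streams forward through the text emitting output and carrying a prev-char-is-alpha flag until it finds the letter's word start, instead of A's single index loop over the text that mutates a char array and inspects position-1; after the abbreviation is exhausted B appends the remaining text in one bulk slice instead of A's per-character walk.
import Mathlib
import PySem

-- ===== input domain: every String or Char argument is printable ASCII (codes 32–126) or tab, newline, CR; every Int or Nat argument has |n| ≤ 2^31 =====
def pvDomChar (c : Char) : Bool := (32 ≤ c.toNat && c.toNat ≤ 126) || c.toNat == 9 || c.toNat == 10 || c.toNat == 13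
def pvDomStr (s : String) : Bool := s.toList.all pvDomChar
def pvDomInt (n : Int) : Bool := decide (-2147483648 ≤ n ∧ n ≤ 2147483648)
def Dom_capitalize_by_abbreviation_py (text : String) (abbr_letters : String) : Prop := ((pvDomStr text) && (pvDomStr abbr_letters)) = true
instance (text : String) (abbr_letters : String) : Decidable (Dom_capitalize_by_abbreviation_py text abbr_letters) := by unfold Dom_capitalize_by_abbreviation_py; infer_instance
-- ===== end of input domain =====

-- B iterates over the ABBREVIATION letters, searching the text stream for each letter's next
-- word start and emitting output forward with a carried prev-alpha flag, instead of A's single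
-- index loop that mutates a char array and looks back at position-1; alternative decomposition.

-- ===== PORT A =====
-- the while loop of A: state = (text_chars, text_pos, abbr_index)
def pyCapLoop (abbr : List Char) (chars : List Char) (pos : Nat) (ai : Nat) : List Char :=
  if h : ai < abbr.length ∧ pos < chars.length then
    let c := chars.getD pos ' '
    if PySem.Chars.lowerChar c = PySem.Chars.lowerChar (abbr.getD ai ' ')
        ∧ (pos = 0 ∨ ¬ PySem.Chars.isalpha (chars.getD (pos - 1) ' ') = true) then
      pyCapLoop abbr (chars.set pos (PySem.Chars.upperChar c)) (pos + 1) (ai + 1)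
    else
      pyCapLoop abbr chars (pos + 1) ai
  else chars
termination_by chars.length - pos
decreasing_by
  · simp only [List.length_set]; omega
  · omega

def capitalize_by_abbreviation_py (text : String) (abbr_letters : String) : String :=
  String.ofList (pyCapLoop abbr_letters.toList text.toList 0 0)

-- ===== PORT B =====
-- B's inner for-loop: scan the remaining text for the next word start matching `target`,
-- emitting chars as it goes; returns (emitted, remaining text, prev_alpha flag, found?)
def altSearch (target : Char) (rest : List Char) (prevAlpha : Bool) :
    List Char × List Char × Bool × Bool :=
  match rest with
  | [] => ([], [], prevAlpha, false)
  | c :: cs =>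
    if !prevAlpha && (PySem.Chars.lowerChar c == target) then
      ([PySem.Chars.upperChar c], cs, PySem.Chars.isalpha c, true)
    else
      let r := altSearch target cs (PySem.Chars.isalpha c)
      (c :: r.1, r.2.1, r.2.2.1, r.2.2.2)

-- B's outer for-loop over the abbreviation letters (with the break + final tail append)
def altOuter (abbr : List Char) (rest : List Char) (prevAlpha : Bool) : List Char :=
  match abbr with
  | [] => rest
  | l :: ls =>
    let r := altSearch (PySem.Chars.lowerChar l) rest prevAlpha
    if r.2.2.2 then r.1 ++ altOuter ls r.2.1 r.2.2.1
    else r.1 ++ r.2.1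

def capitalize_by_abbreviation_py_alt (text : String) (abbr_letters : String) : String :=
  String.ofList (altOuter abbr_letters.toList text.toList false)

-- ===== PRECONDITION & SPEC =====
def Spec_capitalize_by_abbreviation_py (text : String) (abbr_letters : String) (out : String) : Prop := out = capitalize_by_abbreviation_py_alt text abbr_letters
instance (text : String) (abbr_letters : String) (out : String) : Decidable (Spec_capitalize_by_abbreviation_py text abbr_letters out) := by unfold Spec_capitalize_by_abbreviation_py; infer_instance

-- ===== CLAIM (what is proved, stated in full; the proofs are below) =====
def Claim_equal_capitalize_by_abbreviation_py : Prop := ∀ (text : String) (abbr_letters : String), Dom_capitalize_by_abbreviation_py text abbr_letters → Spec_capitalize_by_abbreviation_py text abbr_letters (capitalize_by_abbreviation_py text abbr_letters)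

-- ===== LEMMAS AND PROOFS =====

lemma char_le_iff (a b : Char) : (a ≤ b) ↔ a.toNat ≤ b.toNat :=
  Char.le_def.trans (UInt32.le_iff_toNat_le ..)

-- uppercasing a char preserves alphabetic status
lemma isalpha_upperChar (c : Char) :
    PySem.Chars.isalpha (PySem.Chars.upperChar c) = PySem.Chars.isalpha c := by
  simp only [PySem.Chars.isalpha, PySem.Chars.upperChar, PySem.Chars.isupper, PySem.Chars.islower]
  split_ifs with h
  · simp only [Bool.and_eq_true, decide_eq_true_eq, char_le_iff] at h
    have h1 : 97 ≤ c.toNat := h.1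
    have h2 : c.toNat ≤ 122 := h.2
    have hv : (c.toNat - 32).isValidChar := Or.inl (by omega)
    have ht : (Char.ofNat (c.toNat - 32)).toNat = c.toNat - 32 := by
      unfold Char.ofNat; rw [dif_pos hv]; rfl
    simp only [char_le_iff, ht]
    have e1 : ('A').toNat ≤ c.toNat - 32 := by show 65 ≤ _; omega
    have e2 : c.toNat - 32 ≤ ('Z').toNat := by show _ ≤ 90; omega
    have f1 : ('a').toNat ≤ c.toNat := h.1
    have f2 : c.toNat ≤ ('z').toNat := h.2
    rw [decide_eq_true e1, decide_eq_true e2, decide_eq_true f1, decide_eq_true f2]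
    simp
  · rfl

lemma altOuter_nil (abbr : List Char) (pa : Bool) : altOuter abbr [] pa = [] := by
  cases abbr <;> simp [altOuter, altSearch]

-- B's combined step reads like A's per-character step
lemma altOuter_step (l : Char) (ls : List Char) (c : Char) (cs : List Char) (pa : Bool) :
    altOuter (l :: ls) (c :: cs) pa =
      if (!pa && (PySem.Chars.lowerChar c == PySem.Chars.lowerChar l)) = true then
        PySem.Chars.upperChar c :: altOuter ls cs (PySem.Chars.isalpha c)
      else c :: altOuter (l :: ls) cs (PySem.Chars.isalpha c) := by
  by_cases h : (!pa && (PySem.Chars.lowerChar c == PySem.Chars.lowerChar l)) = true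
  · simp [altOuter, altSearch, h]
  · simp only [altOuter, altSearch, if_neg h]
    split <;> simp_all

lemma cap_loop_eq (abbr : List Char) :
    ∀ (k pos : Nat) (chars : List Char) (ai : Nat),
      chars.length - pos = k →
      pyCapLoop abbr chars pos ai =
        chars.take pos ++ altOuter (abbr.drop ai) (chars.drop pos)
          (decide (pos ≠ 0) && PySem.Chars.isalpha (chars.getD (pos - 1) ' ')) := by
  intro k
  induction k with
  | zero =>
    intro pos chars ai hk
    have hge : chars.length ≤ pos := by omega
    rw [pyCapLoop]
    rw [dif_neg (by omega)]
    rw [List.drop_eq_nil_of_le hge, altOuter_nil, List.append_nil,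
      List.take_of_length_le hge]
  | succ k ih =>
    intro pos chars ai hk
    have hpos : pos < chars.length := by omega
    set c := chars.getD pos ' ' with hc
    have hcel : chars[pos] = c := by
      simp [hc, List.getD, List.getElem?_eq_getElem hpos]
    have hdrop : chars.drop pos = c :: chars.drop (pos + 1) := by
      rw [List.drop_eq_getElem_cons hpos, hcel]
    by_cases hai : ai < abbr.length
    · have habbr : abbr.drop ai = abbr.getD ai ' ' :: abbr.drop (ai + 1) := by
        rw [List.drop_eq_getElem_cons hai]
        simp [List.getD, List.getElem?_eq_getElem hai]
      rw [pyCapLoop, dif_pos ⟨hai, hpos⟩, habbr, hdrop, altOuter_step]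
      -- relate A's Prop condition and B's Bool condition
      have hcond : ((!(decide (pos ≠ 0) && PySem.Chars.isalpha (chars.getD (pos - 1) ' '))
            && (PySem.Chars.lowerChar c == PySem.Chars.lowerChar (abbr.getD ai ' '))) = true)
          ↔ (PySem.Chars.lowerChar c = PySem.Chars.lowerChar (abbr.getD ai ' ')
            ∧ (pos = 0 ∨ ¬ PySem.Chars.isalpha (chars.getD (pos - 1) ' ') = true)) := by
        simp [Bool.and_eq_true, and_comm]
      by_cases hA : PySem.Chars.lowerChar c = PySem.Chars.lowerChar (abbr.getD ai ' ')
          ∧ (pos = 0 ∨ ¬ PySem.Chars.isalpha (chars.getD (pos - 1) ' ') = true)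
      · rw [if_pos hA, if_pos (hcond.mpr hA)]
        set u := PySem.Chars.upperChar c with hu
        have hset := ih (pos + 1) (chars.set pos u) (ai + 1)
          (by simp only [List.length_set]; omega)
        rw [hset]
        have hlen' : pos < (chars.set pos u).length := by simp [List.length_set]; omega
        have h1 : (chars.set pos u).take (pos + 1) = chars.take pos ++ [u] := by
          rw [List.take_succ_eq_append_getElem hlen']
          rw [List.getElem_set_self]
          congr 1
          exact List.take_set_of_le (Nat.le_refl pos)
        have h2 : (chars.set pos u).drop (pos + 1) = chars.drop (pos + 1) :=
          List.drop_set_of_lt (by omega)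
        have h3 : (chars.set pos u).getD (pos + 1 - 1) ' ' = u := by
          simp [List.getD, List.getElem?_set_self hpos]
        rw [h1, h2, h3, hu, isalpha_upperChar]
        simp
      · rw [if_neg hA, if_neg (fun hb => hA (hcond.mp hb))]
        rw [ih (pos + 1) chars ai (by omega)]
        have h3 : chars.getD (pos + 1 - 1) ' ' = c := by simp [hc]
        rw [h3, List.take_succ_eq_append_getElem hpos, hcel, habbr]
        simp
    · rw [pyCapLoop, dif_neg (by tauto)]
      rw [List.drop_eq_nil_of_le (by omega : abbr.length ≤ ai), altOuter,
        List.take_append_drop]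

-- ===== VERDICT (by name: the statement is the Claim_ definition above) =====
theorem capitalize_by_abbreviation_py_spec : Claim_equal_capitalize_by_abbreviation_py := by
  intro text abbr_letters _
  unfold Spec_capitalize_by_abbreviation_py capitalize_by_abbreviation_py
    capitalize_by_abbreviation_py_alt
  rw [cap_loop_eq abbr_letters.toList text.toList.length 0 text.toList 0 (by omega)]
  simp
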